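-- pv_equiv track=rewrite | github.com/nalger2/cpsc-322-final-project | myEDA/utils.py | genre_ratings_counts
-- ===== SOURCE A (Python) =====
-- def genre_ratings_counts(genres, ratings):
--     """Makes parallel lists of movie ratings scored by genre
--
--     Args:
--         genres: 2D list of genres by movie instance
--         ratings: 1D list of ratings by movie instance
--
--     Returns:
--         list_of_genres: parallel to ratings list, list of all genre names
--         rating_by_genre: parallel to list of genres, ratings for each genre
--     """
--     list_of_genres = []
--     ratings_by_genre = []
--     for i in range(len(genres)): #a 2d list of each instance's multiple genres
--         for genre in genres[i]:
--             if genre not in list_of_genres: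
--                 list_of_genres.append(genre)
--                 ratings_by_genre.append([ratings[i]])
--             else:
--                 this_gen_index = list_of_genres.index(genre)
--                 ratings_by_genre[this_gen_index].append(ratings[i])
--     return list_of_genres, ratings_by_genre
-- ===== SOURCE B (Python) =====
-- def genre_ratings_counts(genres, ratings):
--     """Flatten to (genre, rating) pairs, dedupe genres for the order,
--     then collect each genre's ratings by filtering the flat pair list."""
--     pairs = [(g, r) for movie_genres, r in zip(genres, ratings) for g in movie_genres]
--     order = list(dict.fromkeys(g for g, _ in pairs))
--     return order, [[r for g, r in pairs if g == key] for key in order]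
-- ===== Notes on version B (the rewrite author's own statement) =====
-- stated objective: simpler
-- what changed: Replaces A's single stateful pass with parallel lists, membership tests and list.index scans by three staged passes: flatten zip(genres, ratings) to (genre, rating) pairs, dedupe the genre stream with dict.fromkeys to get the order, then build each genre's bucket with one filtering comprehension over the flat pairs.
import Mathlib
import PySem

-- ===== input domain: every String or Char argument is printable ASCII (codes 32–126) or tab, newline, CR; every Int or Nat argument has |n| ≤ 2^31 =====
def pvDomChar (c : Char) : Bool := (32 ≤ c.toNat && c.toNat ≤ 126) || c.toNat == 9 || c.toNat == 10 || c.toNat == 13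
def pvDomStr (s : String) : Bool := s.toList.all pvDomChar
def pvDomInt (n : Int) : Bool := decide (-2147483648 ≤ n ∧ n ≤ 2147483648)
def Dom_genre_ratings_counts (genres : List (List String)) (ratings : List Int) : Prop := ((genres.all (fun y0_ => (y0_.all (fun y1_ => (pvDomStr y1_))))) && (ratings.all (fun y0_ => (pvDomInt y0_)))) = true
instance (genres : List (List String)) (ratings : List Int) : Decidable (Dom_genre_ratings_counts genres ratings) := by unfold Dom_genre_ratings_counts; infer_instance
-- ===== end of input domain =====

-- B replaces A's stateful pass (parallel lists, membership test, list.index scan) by staged passes: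
-- flatten to (genre, rating) pairs, dedupe for the order, filter per genre; return value only, no mutation.


-- ===== PORT A =====
-- one inner-loop step of A: 'if genre not in list_of_genres: append/append else: index & in-place append'
def grcStep (r : Int) (st : List String × List (List Int)) (genre : String) : List String × List (List Int) :=
  if genre ∉ st.1 then
    (st.1 ++ [genre], st.2 ++ [[r]])
  else
    let this_gen_index := (PySem.List.index? st.1 genre).getD 0
    (st.1, st.2.modify this_gen_index (· ++ [r]))

def genre_ratings_counts (genres : List (List String)) (ratings : List Int) : List String × List (List Int) :=
  (PySem.List.pyRange 0 (genres.length : Int) 1).foldl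
    (fun st i => (PySem.List.pyGetD genres i []).foldl (grcStep (PySem.List.pyGetD ratings i 0)) st)
    ([], [])

-- ===== PORT B =====
-- the flattened pair comprehension, dict.fromkeys dedup (= PySem.List.dedup), and the filter comprehension
def genre_ratings_counts_alt (genres : List (List String)) (ratings : List Int) : List String × List (List Int) :=
  let pairs := (genres.zip ratings).flatMap (fun p => p.1.map (fun g => (g, p.2)))
  let order := PySem.List.dedup (pairs.map (·.1))
  (order, order.map (fun key => (pairs.filter (fun q => q.1 == key)).map (·.2)))

-- ===== PRECONDITION & SPEC =====
-- Pre_ excludes exactly the inputs where A raises IndexError: a movie at an index beyond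
-- len(ratings) whose genre list is non-empty forces the read ratings[i] to fail.
def Pre_genre_ratings_counts (genres : List (List String)) (ratings : List Int) : Prop :=
  ∀ l ∈ genres.drop ratings.length, l = []
instance (genres : List (List String)) (ratings : List Int) : Decidable (Pre_genre_ratings_counts genres ratings) := by unfold Pre_genre_ratings_counts; infer_instance

def pvWitness_genre_ratings_counts : List (List String) × List Int :=
  ([["Action", "Comedy"], ["Action"]], [5, 3])

def Spec_genre_ratings_counts (genres : List (List String)) (ratings : List Int) (out : List String × List (List Int)) : Prop := out = genre_ratings_counts_alt genres ratings
instance (genres : List (List String)) (ratings : List Int) (out : List String × List (List Int)) : Decidable (Spec_genre_ratings_counts genres ratings out) := by unfold Spec_genre_ratings_counts; infer_instance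

-- ===== CLAIM (what is proved, stated in full; the proofs are below) =====
def Claim_equal_genre_ratings_counts : Prop := ∀ (genres : List (List String)) (ratings : List Int), Dom_genre_ratings_counts genres ratings → Pre_genre_ratings_counts genres ratings → Spec_genre_ratings_counts genres ratings (genre_ratings_counts genres ratings)
-- ===== LEMMAS AND PROOFS =====

-- A's nested loop over zip(genres, ratings) is one loop over the flattened pair list
lemma foldl_flatMap {α β γ : Type} (f : α → List β) (g : γ → β → γ) :
    ∀ (l : List α) (init : γ),
      (l.flatMap f).foldl g init = l.foldl (fun st x => (f x).foldl g st) init := by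
  intro l
  induction l with
  | nil => intro init; rfl
  | cons x xs ih => intro init; rw [List.flatMap_cons, List.foldl_append, ih]; rfl

-- list.index on a Nodup list is idxOf
lemma index?_getD_eq_idxOf (names : List String) (g : String) (h : g ∈ names) :
    (PySem.List.index? names g).getD 0 = names.idxOf g := by
  have hi : names.idxOf g < names.length := List.idxOf_lt_length_of_mem h
  simp only [PySem.List.index?]
  rw [List.idxOf_eq_getD_idxOf? g names] at hi ⊢
  cases hx : List.idxOf? g names with
  | none => rw [hx] at hi; simp at hi
  | some k => simp

-- mapping a function changed only at g (∈ order, Nodup) is an in-place modify at idxOf g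
lemma map_modify_at (r : Int) (g : String) (f f' : String → List Int)
    (hsame : ∀ k, k ≠ g → f' k = f k) (hg : f' g = f g ++ [r]) :
    ∀ (order : List String), order.Nodup → g ∈ order →
      order.map f' = (order.map f).modify (order.idxOf g) (· ++ [r]) := by
  intro order
  induction order with
  | nil => intro _ h; simp at h
  | cons n ns ih =>
    intro hnd hmem
    by_cases hn : n = g
    · subst hn
      have hnot : n ∉ ns := (List.nodup_cons.mp hnd).1
      have : ns.map f' = ns.map f := by
        apply List.map_congr_left
        intro k hk
        exact hsame k (fun h => hnot (h ▸ hk))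
      simp [List.idxOf_cons_self, this, hg]
    · have hmem' : g ∈ ns := by
        rcases List.mem_cons.mp hmem with h | h
        · exact absurd h.symm hn
        · exact h
      have hidx : (n :: ns).idxOf g = ns.idxOf g + 1 := by
        simp [hn]
      rw [List.map_cons, List.map_cons, hsame n hn, hidx, List.modify_succ_cons]
      exact congrArg (List.cons (f n)) (ih (List.nodup_cons.mp hnd).2 hmem')

-- main invariant: folding A's step over the flat pair list yields B's (dedup, filters)
lemma foldPairs (ps : List (String × Int)) :
    ps.foldl (fun st q => grcStep q.2 st q.1) ([], []) =
    (PySem.List.dedup (ps.map (·.1)),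
     (PySem.List.dedup (ps.map (·.1))).map
       (fun key => (ps.filter (fun q => q.1 == key)).map (·.2))) := by
  induction ps using List.reverseRecOn with
  | nil => rfl
  | append_singleton ps q ih =>
    rw [List.foldl_append, List.foldl_cons, List.foldl_nil, ih]
    have hdd : PySem.List.dedup ((ps ++ [q]).map (·.1))
        = PySem.Set.add (PySem.List.dedup (ps.map (·.1))) q.1 := by
      simp only [PySem.List.dedup_eq_ofList, List.map_append, List.map_cons, List.map_nil]
      exact PySem.Set.ofList_append_singleton _ _
    set order := PySem.List.dedup (ps.map (·.1)) with horder
    have hnd : order.Nodup := PySem.List.nodup_dedup _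
    have hmemiff : ∀ k, k ∈ order ↔ k ∈ ps.map (·.1) := fun k => PySem.List.mem_dedup _ k
    have hfilter : ∀ k, (ps ++ [q]).filter (fun p => p.1 == k)
        = ps.filter (fun p => p.1 == k) ++ (if q.1 == k then [q] else []) := by
      intro k; rw [List.filter_append]; cases h : (q.1 == k) <;> simp [List.filter, h]
    by_cases hmem : q.1 ∈ order
    · -- existing genre: modify the bucket at its index
      have hadd : PySem.Set.add order q.1 = order := PySem.Set.add_of_mem hmem
      simp only [grcStep, hmem, not_true_eq_false, if_false, hdd, hadd]
      refine Prod.ext rfl ?_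
      dsimp only
      rw [index?_getD_eq_idxOf order q.1 hmem]
      symm
      refine map_modify_at q.2 q.1
        (fun k => (ps.filter (fun p => p.1 == k)).map (·.2))
        (fun k => ((ps ++ [q]).filter (fun p => p.1 == k)).map (·.2)) ?_ ?_ order hnd hmem
      · intro k hk
        have : (q.1 == k) = false := beq_false_of_ne (fun h => hk (h ▸ rfl))
        simp only [hfilter, this]
        simp
      · simp only [hfilter]
        simp
    · -- new genre: append the genre and a fresh bucket
      have hadd : PySem.Set.add order q.1 = order ++ [q.1] := PySem.Set.add_of_not_mem hmem
      simp only [grcStep, hmem, not_false_eq_true, if_true, hdd, hadd]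
      refine Prod.ext rfl ?_
      dsimp only
      rw [List.map_append]
      congr 1
      · apply List.map_congr_left
        intro k hk
        rw [hfilter k]
        have hne : (q.1 == k) = false :=
          beq_false_of_ne (fun h => hmem (h ▸ hk))
        simp [hne]
      · have hnil : ps.filter (fun p => p.1 == q.1) = [] := by
          rw [List.filter_eq_nil_iff]
          intro p hp hb
          have : p.1 ∈ ps.map (·.1) := List.mem_map_of_mem hp
          exact hmem ((hmemiff q.1).mpr (eq_of_beq hb ▸ this))
        simp [hnil]

-- A's index loop over range(len(genres)) collapses to a loop over zip(genres, ratings),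
-- because Pre_ makes every genre list beyond len(ratings) empty.
lemma foldA_zip :
    ∀ (gs : List (List String)) (rs : List Int) (st : List String × List (List Int)),
      (∀ l ∈ gs.drop rs.length, l = []) →
      (List.range gs.length).foldl
        (fun st i => (gs.getD i []).foldl (grcStep (rs.getD i 0)) st) st
      = (gs.zip rs).foldl (fun st p => p.1.foldl (grcStep p.2) st) st := by
  intro gs
  induction gs with
  | nil => intro rs st _; simp
  | cons g gs ih =>
    intro rs st h
    rw [List.length_cons, List.range_succ_eq_map, List.foldl_cons, List.foldl_map]
    cases rs with
    | nil =>
      have hg : g = [] := h g (by simp)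
      have hrest : ∀ l ∈ gs.drop 0, l = [] := by
        intro l hl
        simp only [List.drop_zero] at hl
        exact h l (by simpa using List.mem_cons_of_mem g hl)
      have := ih [] (st := ((g :: gs).getD 0 []).foldl (grcStep (([] : List Int).getD 0 0)) st) hrest
      simpa [hg] using this
    | cons r rs =>
      have hrest : ∀ l ∈ gs.drop rs.length, l = [] := by
        intro l hl; exact h l (by simpa using hl)
      have := ih rs (st := ((g :: gs).getD 0 []).foldl (grcStep ((r :: rs).getD 0 0)) st) hrest
      simpa using this

-- ===== VERDICT (by name: the statements are the Claim_ definitions above) =====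
theorem genre_ratings_counts_spec : Claim_equal_genre_ratings_counts := by
  intro genres ratings _ hpre
  unfold Spec_genre_ratings_counts genre_ratings_counts genre_ratings_counts_alt
  rw [PySem.List.pyRange_zero_nat, List.foldl_map]
  simp only [PySem.List.pyGetD_natCast]
  rw [foldA_zip genres ratings ([], []) hpre]
  rw [show (fun st (p : List String × Int) => p.1.foldl (grcStep p.2) st)
      = (fun st p => (p.1.map (fun g => (g, p.2))).foldl
          (fun st (q : String × Int) => grcStep q.2 st q.1) st) by
    funext st p; rw [List.foldl_map]]
  rw [← foldl_flatMap]
  exact foldPairs _
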